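-- pv_equiv track=rewrite | github.com/MarceloDeLaBarrera/Practicando-Python | Listas, tuplas, diccionarios/Ejercicio 8 Prefix Herarchy.py | prefix_herarchy
-- ===== SOURCE A (Python) =====
-- def prefix_herarchy(list, query):
--     number_of_coincidences = []
--     counter = 0
--
--     for i in range(len(query)):
--         counter = 0
--         for j in range(len(list)):
--             if list[j].lower().startswith(query[i].lower()):
--                 if list[j].lower() != query[i].lower():
--                     counter += 1
--         number_of_coincidences.append(counter)
--
--     return number_of_coincidences
-- ===== SOURCE B (Python) =====
-- def prefix_herarchy(list, query):
--     # Build counting tables once: exact lowercase multiplicities, and counts of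
--     # every lowercase prefix; each query is then answered by two O(1) lookups.
--     exact = {}
--     pref = {}
--     for s in list:
--         t = s.lower()
--         exact[t] = exact.get(t, 0) + 1
--         for k in range(len(t) + 1):
--             p = t[:k]
--             pref[p] = pref.get(p, 0) + 1
--     return [pref.get(q.lower(), 0) - exact.get(q.lower(), 0) for q in query]
-- ===== Notes on version B (the rewrite author's own statement) =====
-- stated objective: faster
-- what changed: A rescans the whole list for every query; B builds two counting dictionaries in one pass over the list (lowercase exact multiplicities and lowercase-prefix multiplicities) and answers each query with two O(1) lookups (prefix count minus exact count).
import Mathlib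
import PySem

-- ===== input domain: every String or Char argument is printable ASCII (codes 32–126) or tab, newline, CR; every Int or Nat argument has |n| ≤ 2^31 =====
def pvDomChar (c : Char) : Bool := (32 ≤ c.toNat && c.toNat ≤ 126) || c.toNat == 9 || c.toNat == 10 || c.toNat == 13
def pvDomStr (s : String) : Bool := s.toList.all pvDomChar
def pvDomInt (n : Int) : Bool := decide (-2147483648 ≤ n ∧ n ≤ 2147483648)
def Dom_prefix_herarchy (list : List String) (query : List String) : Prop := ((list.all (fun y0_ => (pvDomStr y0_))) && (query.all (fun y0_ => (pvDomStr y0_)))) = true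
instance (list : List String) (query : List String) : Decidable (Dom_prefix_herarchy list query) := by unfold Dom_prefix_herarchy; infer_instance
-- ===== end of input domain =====

-- B replaces A's per-query scan of the whole list by counting tables (lowercase exact
-- multiplicities and lowercase-prefix multiplicities) built in one pass over the list,
-- answering each query with two dictionary lookups.

-- ===== PORT A =====
def prefix_herarchy (list : List String) (query : List String) : List Int :=
  (PySem.List.pyRange 0 (query.length : Int) 1).foldl (fun number_of_coincidences i =>
    let counter : Int :=
      (PySem.List.pyRange 0 (list.length : Int) 1).foldl (fun counter j =>
        if PySem.Str.startswith (PySem.Str.lower (PySem.List.pyGetD list j ""))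
                                (PySem.Str.lower (PySem.List.pyGetD query i "")) then
          if PySem.Str.lower (PySem.List.pyGetD list j "") ≠
             PySem.Str.lower (PySem.List.pyGetD query i "") then counter + 1
          else counter
        else counter) 0
    number_of_coincidences ++ [counter]) []

-- ===== PORT B =====
def prefix_herarchy_alt (list : List String) (query : List String) : List Int :=
  let tables : PySem.Dict String Int × PySem.Dict String Int :=
    list.foldl (fun ep s =>
      let t := PySem.Str.lower s
      let exact := ep.1.insert t (ep.1.getD t 0 + 1)
      let pref := (PySem.List.pyRange 0 (PySem.Str.len t + 1) 1).foldl
        (fun d k =>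
          let pfx := PySem.Str.slice t none (some k)
          d.insert pfx (d.getD pfx 0 + 1)) ep.2
      (exact, pref)) (PySem.Dict.empty, PySem.Dict.empty)
  query.map (fun q =>
    tables.2.getD (PySem.Str.lower q) 0 - tables.1.getD (PySem.Str.lower q) 0)

-- ===== PRECONDITION & SPEC =====
def Spec_prefix_herarchy (list : List String) (query : List String) (out : List Int) : Prop := out = prefix_herarchy_alt list query
instance (list : List String) (query : List String) (out : List Int) : Decidable (Spec_prefix_herarchy list query out) := by unfold Spec_prefix_herarchy; infer_instance

-- ===== CLAIM (what is proved, stated in full; the proofs are below) =====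
def Claim_equal_prefix_herarchy : Prop := ∀ (list : List String) (query : List String), Dom_prefix_herarchy list query → Spec_prefix_herarchy list query (prefix_herarchy list query)

-- ===== LEMMAS AND PROOFS =====

-- among take k tc for k = 0..|tc|, xc occurs exactly once when it is a prefix of tc, else never
theorem pv_countP_take (tc xc : List Char) :
    (List.range (tc.length + 1)).countP (fun k => decide (tc.take k = xc))
      = if xc <+: tc then 1 else 0 := by
  by_cases h : xc <+: tc
  · rw [if_pos h]
    have hc : ∀ k ∈ List.range (tc.length + 1),
        (decide (tc.take k = xc) = true) ↔ ((k == xc.length) = true) := by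
      intro k hk
      simp only [List.mem_range, Nat.lt_succ_iff] at hk
      simp only [decide_eq_true_eq, beq_iff_eq]
      constructor
      · intro he
        have := congrArg List.length he
        simp only [List.length_take, Nat.min_eq_left hk] at this
        omega
      · intro hkx
        subst hkx
        exact (List.prefix_iff_eq_take.mp h).symm
    rw [List.countP_congr hc]
    have hlen : xc.length ≤ tc.length := h.length_le
    have := List.count_range (a := xc.length) (n := tc.length + 1)
    simp only [Nat.lt_succ_iff, hlen, if_true] at this
    simpa [List.count] using this
  · rw [if_neg h]
    rw [List.countP_eq_zero]
    intro k _
    simp only [decide_eq_true_eq]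
    intro he
    exact h (he ▸ List.take_prefix k tc)

-- the per-item prefix list t[:k], k = 0..len(t), counts x once iff t starts with x
theorem pv_count_prefixes (t x : String) :
    ((PySem.List.pyRange 0 (PySem.Str.len t + 1) 1).map
        (fun k => PySem.Str.slice t none (some k))).count x
      = if PySem.Str.startswith t x then 1 else 0 := by
  have h1 : PySem.Str.len t + 1 = ((t.toList.length + 1 : Nat) : Int) := by
    simp [PySem.Str.len_eq]
  rw [h1, PySem.List.pyRange_zero_natCast, List.map_map]
  rw [List.count_eq_countP, List.countP_map]
  simp only [Function.comp_def]
  have hc : ∀ k ∈ List.range (t.toList.length + 1),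
      ((PySem.Str.slice t none (some (k : Int)) == x) = true)
        ↔ ((decide (t.toList.take k = x.toList)) = true) := by
    intro k _
    simp only [beq_iff_eq, decide_eq_true_eq]
    rw [← String.toList_inj, PySem.Str.toList_slice]
    constructor
    · intro he; rw [← he]; simp [PySem.Chars.slice, PySem.List.slice_to_natCast]
    · intro he; rw [← he]; simp [PySem.Chars.slice, PySem.List.slice_to_natCast]
  rw [List.countP_congr hc, pv_countP_take]
  have hbr : (PySem.Str.startswith t x = true) ↔ x.toList <+: t.toList := by
    rw [PySem.Str.startswith_eq, PySem.Chars.startswith_iff]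
  by_cases hp : x.toList <+: t.toList
  · rw [if_pos hp, if_pos (hbr.mpr hp)]
  · rw [if_neg hp, if_neg (fun h => hp (hbr.mp h))]

-- invariant of B's single building pass: what each table holds at any key
theorem pv_tables_getD (l : List String) (e p : PySem.Dict String Int) (x : String) :
    ((l.foldl (fun ep s =>
        let t := PySem.Str.lower s
        let exact := ep.1.insert t (ep.1.getD t 0 + 1)
        let pref := (PySem.List.pyRange 0 (PySem.Str.len t + 1) 1).foldl
          (fun d k =>
            let pfx := PySem.Str.slice t none (some k)
            d.insert pfx (d.getD pfx 0 + 1)) ep.2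
        (exact, pref)) (e, p)).1.getD x 0
      = e.getD x 0 + ((l.map PySem.Str.lower).count x : Int))
    ∧ ((l.foldl (fun ep s =>
        let t := PySem.Str.lower s
        let exact := ep.1.insert t (ep.1.getD t 0 + 1)
        let pref := (PySem.List.pyRange 0 (PySem.Str.len t + 1) 1).foldl
          (fun d k =>
            let pfx := PySem.Str.slice t none (some k)
            d.insert pfx (d.getD pfx 0 + 1)) ep.2
        (exact, pref)) (e, p)).2.getD x 0
      = p.getD x 0 + (l.countP (fun s => PySem.Str.startswith (PySem.Str.lower s) x) : Int)) := by
  induction l generalizing e p with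
  | nil => simp
  | cons s l ih =>
    simp only [List.foldl_cons, List.map_cons, List.count_cons, List.countP_cons]
    have hinner : ∀ (d : PySem.Dict String Int),
        ((PySem.List.pyRange 0 (PySem.Str.len (PySem.Str.lower s) + 1) 1).foldl
          (fun d k =>
            let pfx := PySem.Str.slice (PySem.Str.lower s) none (some k)
            d.insert pfx (d.getD pfx 0 + 1)) d).getD x 0
        = d.getD x 0 + (if PySem.Str.startswith (PySem.Str.lower s) x then 1 else 0) := by
      intro d
      rw [show (List.foldl (fun d k =>
              let pfx := PySem.Str.slice (PySem.Str.lower s) none (some k)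
              d.insert pfx (d.getD pfx 0 + 1)) d
              (PySem.List.pyRange 0 (PySem.Str.len (PySem.Str.lower s) + 1) 1))
          = (List.foldl (fun d pfx => PySem.Dict.insert d pfx (d.getD pfx 0 + 1)) d
              ((PySem.List.pyRange 0 (PySem.Str.len (PySem.Str.lower s) + 1) 1).map
                (fun k => PySem.Str.slice (PySem.Str.lower s) none (some k))))
          from (List.foldl_map
              (f := fun k => PySem.Str.slice (PySem.Str.lower s) none (some k))
              (g := fun d pfx => PySem.Dict.insert d pfx (d.getD pfx 0 + 1))
              (l := PySem.List.pyRange 0 (PySem.Str.len (PySem.Str.lower s) + 1) 1)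
              (init := d)).symm]
      rw [PySem.Dict.getD_foldl_insert_add_one, pv_count_prefixes]
      split_ifs <;> simp
    refine ⟨?_, ?_⟩
    · rw [(ih _ _).1, PySem.Dict.getD_insert]
      by_cases h : x = PySem.Str.lower s
      · subst h
        simp
        omega
      · have h' : PySem.Str.lower s ≠ x := Ne.symm h
        have hb : (PySem.Str.lower s == x) = false := by simp [h']
        simp only [h, if_false, hb, Bool.false_eq_true]
        push_cast
        omega
    · rw [(ih _ _).2, hinner]
      split_ifs <;> push_cast <;> omega

theorem pv_startswith_self (a : String) : PySem.Str.startswith a a = true := by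
  rw [PySem.Str.startswith_eq, PySem.Chars.startswith_iff]

-- prefix count minus exact count equals A's combined "prefix but not equal" count
theorem pv_counts_split (l : List String) (lq : String) :
    (l.countP (fun s => PySem.Str.startswith (PySem.Str.lower s) lq) : Int)
        - ((l.map PySem.Str.lower).count lq : Int)
      = (l.countP (fun s =>
          PySem.Str.startswith (PySem.Str.lower s) lq
            && !(PySem.Str.lower s == lq)) : Int) := by
  induction l with
  | nil => simp
  | cons s l ih =>
    simp only [List.countP_cons, List.map_cons, List.count_cons]
    by_cases he : PySem.Str.lower s = lq
    · have hs : PySem.Str.startswith (PySem.Str.lower s) lq = true := by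
        rw [he]; exact pv_startswith_self lq
      simp only [he, pv_startswith_self, beq_self_eq_true, Bool.not_true, Bool.and_false,
        if_true]
      push_cast
      omega
    · have hne : (PySem.Str.lower s == lq) = false := by simp [he]
      simp only [hne, Bool.false_eq_true, if_false, Bool.not_false, Bool.and_true]
      push_cast
      omega

-- a map over range(len(xs)) reading xs[i] is a map over xs
theorem pv_map_over_index {α β : Type} (xs : List α) (d : α) (g : α → β) :
    (PySem.List.pyRange 0 (xs.length : Int) 1).map
        (fun i => g (PySem.List.pyGetD xs i d)) = xs.map g := by
  rw [show (fun i => g (PySem.List.pyGetD xs i d))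
        = g ∘ (fun i => PySem.List.pyGetD xs i d) from rfl]
  rw [← List.map_map, PySem.List.map_pyGetD_pyRange_zero']

-- ===== VERDICT (by name: the statement is the Claim_ definition above) =====
theorem prefix_herarchy_spec : Claim_equal_prefix_herarchy := by
  intro list query _
  unfold Spec_prefix_herarchy prefix_herarchy prefix_herarchy_alt
  rw [PySem.List.foldl_append_singleton_eq_map
        (f := fun i =>
          (PySem.List.pyRange 0 (list.length : Int) 1).foldl (fun counter j =>
            if PySem.Str.startswith (PySem.Str.lower (PySem.List.pyGetD list j ""))
                                    (PySem.Str.lower (PySem.List.pyGetD query i "")) then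
              if PySem.Str.lower (PySem.List.pyGetD list j "") ≠
                 PySem.Str.lower (PySem.List.pyGetD query i "") then counter + 1
              else counter
            else counter) 0)]
  rw [List.nil_append]
  rw [pv_map_over_index query ""
        (fun q =>
          (PySem.List.pyRange 0 (list.length : Int) 1).foldl (fun counter j =>
            if PySem.Str.startswith (PySem.Str.lower (PySem.List.pyGetD list j ""))
                                    (PySem.Str.lower q) then
              if PySem.Str.lower (PySem.List.pyGetD list j "") ≠
                 PySem.Str.lower q then counter + 1
              else counter
            else counter) 0)]
  refine List.map_congr_left ?_
  intro q _
  rw [PySem.List.foldl_pyRange_zero_pyGetD' list ""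
        (fun counter s =>
          if PySem.Str.startswith (PySem.Str.lower s) (PySem.Str.lower q) then
            if PySem.Str.lower s ≠ PySem.Str.lower q then counter + 1
            else counter
          else counter) 0]
  rw [show (fun (counter : Int) (s : String) =>
        if PySem.Str.startswith (PySem.Str.lower s) (PySem.Str.lower q) then
          if PySem.Str.lower s ≠ PySem.Str.lower q then counter + 1
          else counter
        else counter)
      = (fun (counter : Int) (s : String) =>
          if PySem.Str.startswith (PySem.Str.lower s) (PySem.Str.lower q)
              && !(PySem.Str.lower s == PySem.Str.lower q) then counter + 1
          else counter) from by
    funext c s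
    by_cases h2 : PySem.Str.lower s = PySem.Str.lower q <;> simp [h2]]
  rw [PySem.List.foldl_count_if]
  rw [(pv_tables_getD list PySem.Dict.empty PySem.Dict.empty (PySem.Str.lower q)).1,
      (pv_tables_getD list PySem.Dict.empty PySem.Dict.empty (PySem.Str.lower q)).2]
  rw [← pv_counts_split list (PySem.Str.lower q)]
  simp
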